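-- pv_equiv track=rewrite | github.com/jswashburn/SarcasticClipboard | sarcasm_formatter.py | format_pure
-- ===== SOURCE A (Python) =====
-- def format_pure(string):
--     formatted = ""
--     for i in range(len(string)):
--         c = string[i]
--         if i % 2 == 0:
--             formatted += c.swapcase()
--         else:
--             formatted += c
--     return formatted
-- ===== SOURCE B (Python) =====
-- def format_pure(string):
--     out = []
--     it = iter(string)
--     for even_char in it:
--         out.append(even_char.swapcase())
--         out.append(next(it, ""))
--     return "".join(out)
-- ===== Notes on version B (the rewrite author's own statement) =====
-- stated objective: alternative
-- what changed: Replaces the index loop with its i%2 parity branch and repeated string concatenation by pair-at-a-time consumption of a single character iterator (swapcase the first of each pair, keep the second), collecting into a list joined once.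
import Mathlib
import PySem

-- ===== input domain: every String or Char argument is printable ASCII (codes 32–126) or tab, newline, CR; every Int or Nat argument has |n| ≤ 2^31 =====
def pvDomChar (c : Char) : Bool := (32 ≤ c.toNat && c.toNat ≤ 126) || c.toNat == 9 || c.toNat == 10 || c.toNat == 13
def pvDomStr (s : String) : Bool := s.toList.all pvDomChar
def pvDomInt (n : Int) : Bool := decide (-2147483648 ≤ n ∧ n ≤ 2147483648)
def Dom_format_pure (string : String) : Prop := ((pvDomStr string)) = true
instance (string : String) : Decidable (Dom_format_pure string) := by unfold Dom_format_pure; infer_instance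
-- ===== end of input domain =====

-- B consumes the string two characters at a time through one iterator (swapcase the first,
-- keep the second), appending to a list joined once, instead of A's index loop with a
-- parity branch and repeated string concatenation; objective: alternative decomposition.


-- shared primitive both Pythons call: str.swapcase on one character (exact on ASCII, the stated domain)
def pvSwapChar (c : Char) : Char :=
  if PySem.Str.isupper c then PySem.Chars.lowerChar c
  else if PySem.Str.islower c then PySem.Chars.upperChar c
  else c

-- ===== PORT A =====
-- for i in range(len(string)): c = string[i]; parity branch; formatted += …
-- (string indexing via pyGet?; its none branch is unreachable since i ranges over [0, len))
def format_pure (string : String) : String :=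
  String.ofList <|
    (PySem.List.pyRange 0 (string.toList.length : Int) 1).foldl
      (fun formatted i =>
        match PySem.List.pyGet? string.toList i with
        | some c =>
            if PySem.Int.mod i 2 = 0 then formatted ++ [pvSwapChar c]
            else formatted ++ [c]
        | none => formatted)
      []

-- ===== PORT B =====
-- pair-at-a-time consumption of the character stream: swapcase the first of each pair,
-- keep the second; next(it, "") on an exhausted iterator contributes the empty string.
def pvFormatGo : List Char → List Char
  | [] => []
  | [e] => [pvSwapChar e]
  | e :: o :: rest => pvSwapChar e :: o :: pvFormatGo rest

def format_pure_alt (string : String) : String :=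
  String.ofList (pvFormatGo string.toList)

-- ===== PRECONDITION & SPEC =====
def Spec_format_pure (string : String) (out : String) : Prop := out = format_pure_alt string
instance (string : String) (out : String) : Decidable (Spec_format_pure string out) := by unfold Spec_format_pure; infer_instance

-- ===== CLAIM (what is proved, stated in full; the proofs are below) =====
def Claim_equal_format_pure : Prop := ∀ (string : String), Dom_format_pure string → Spec_format_pure string (format_pure string)

-- ===== LEMMAS AND PROOFS =====

-- A's loop body, folded over the enumerated characters from any even start index 2*k,
-- produces exactly B's pair-at-a-time recursion.
theorem pv_enum_fold (xs : List Char) : ∀ (k : Nat) (acc : List Char),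
    (PySem.List.enumerate xs (2 * (k : Int))).foldl
      (fun formatted p =>
        if PySem.Int.mod p.1 2 = 0 then formatted ++ [pvSwapChar p.2]
        else formatted ++ [p.2])
      acc = acc ++ pvFormatGo xs := by
  induction xs using pvFormatGo.induct with
  | case1 => intro k acc; simp [PySem.List.enumerate_nil, pvFormatGo]
  | case2 e =>
      intro k acc
      have h : PySem.Int.mod (2 * (k : Int)) 2 = 0 := by
        simp [PySem.Int.mod, Int.fmod_eq_emod]
      simp only [PySem.List.enumerate_cons, PySem.List.enumerate_nil,
        List.foldl_cons, List.foldl_nil, h, if_true]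
      simp [pvFormatGo]
  | case3 e o rest ih =>
      intro k acc
      have h0 : PySem.Int.mod (2 * (k : Int)) 2 = 0 := by
        simp [PySem.Int.mod, Int.fmod_eq_emod]
      have h1 : PySem.Int.mod (2 * (k : Int) + 1) 2 = 1 := by
        simp only [PySem.Int.mod, Int.fmod_eq_emod]
        omega
      have h2 : (2 : Int) * (k : Int) + 1 + 1 = 2 * ((k + 1 : Nat) : Int) := by push_cast; ring
      simp only [PySem.List.enumerate_cons, List.foldl_cons, h0, h1, if_true]
      rw [if_neg (by norm_num), h2, ih (k + 1) (acc ++ [pvSwapChar e] ++ [o])]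
      simp [pvFormatGo]

-- in-range indexing: string[i] is the same character pyGetD returns
theorem pv_get_eq (xs : List Char) (i : Int) (h0 : 0 ≤ i) (h1 : i < (xs.length : Int)) :
    PySem.List.pyGet? xs i = some (PySem.List.pyGetD xs i ' ') := by
  have hk : i.toNat < xs.length := by omega
  simp [PySem.List.pyGetD, PySem.List.pyGet?, PySem.List.pyIdx?, h0, h1,
    List.getElem?_eq_getElem hk]

-- ===== VERDICT (by name: the statement is the Claim_ definition above) =====
theorem format_pure_spec : Claim_equal_format_pure := by
  intro s _
  unfold Spec_format_pure format_pure format_pure_alt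
  congr 1
  have hbody :
      (PySem.List.pyRange 0 (s.toList.length : Int) 1).foldl
        (fun formatted i =>
          match PySem.List.pyGet? s.toList i with
          | some c =>
              if PySem.Int.mod i 2 = 0 then formatted ++ [pvSwapChar c]
              else formatted ++ [c]
          | none => formatted)
        [] =
      (PySem.List.pyRange 0 (s.toList.length : Int) 1).foldl
        (fun formatted i =>
          (fun formatted (p : Int × Char) =>
            if PySem.Int.mod p.1 2 = 0 then formatted ++ [pvSwapChar p.2]
            else formatted ++ [p.2]) formatted (i, PySem.List.pyGetD s.toList i ' '))
        [] := by
    apply PySem.List.foldl_congr_mem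
    intro acc i hi
    obtain ⟨hi0, hi1⟩ := (PySem.List.mem_pyRange_one).1 hi
    rw [pv_get_eq s.toList i hi0 hi1]
  rw [hbody]
  have hfold :
      (PySem.List.pyRange 0 (s.toList.length : Int) 1).foldl
        (fun formatted i =>
          (fun formatted (p : Int × Char) =>
            if PySem.Int.mod p.1 2 = 0 then formatted ++ [pvSwapChar p.2]
            else formatted ++ [p.2]) formatted (i, PySem.List.pyGetD s.toList i ' '))
        [] =
      (PySem.List.enumerate s.toList).foldl
        (fun formatted p =>
          if PySem.Int.mod p.1 2 = 0 then formatted ++ [pvSwapChar p.2]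
          else formatted ++ [p.2])
        [] := by
    rw [PySem.List.enumerate_eq_map_pyRange s.toList ' ', List.foldl_map]
    simp [PySem.List.len]
  rw [hfold]
  have := pv_enum_fold s.toList 0 []
  simpa using this
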